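-- pv_equiv track=rewrite | github.com/STYX-404/CodeKatas | [6] Ordered Count of Characters.py | ordered_count
-- ===== SOURCE A (Python) =====
-- def tupling(char, count):
--     lst_to_tuple = []
--     lst_to_tuple.append(char)
--     lst_to_tuple.append(count)
--     result_tuple = tuple(lst_to_tuple)
--     return result_tuple
--
-- def ordered_count(input):
--     result_lst = []
--     chars_lst = []
--     word_length = len(input)
--     for i in range(0, word_length):
--         count_of_char = 1
--         for j in range(i + 1, word_length):
--             if input[j] == input[i]:
--                 count_of_char += 1
--         if input[i] not in chars_lst:
--             result_lst.append(tupling(input[i], count_of_char))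
--         chars_lst.append(input[i])
--
--     return result_lst
-- ===== SOURCE B (Python) =====
-- def ordered_count(input):
--     counts = {}
--     for ch in input:
--         counts[ch] = counts.get(ch, 0) + 1
--     return list(counts.items())
-- ===== Notes on version B (the rewrite author's own statement) =====
-- stated objective: faster
-- what changed: Single left-to-right pass maintaining an insertion-ordered dict of running counts, replacing A's nested inner counting loop and separate chars_lst membership scan.
import Mathlib
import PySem

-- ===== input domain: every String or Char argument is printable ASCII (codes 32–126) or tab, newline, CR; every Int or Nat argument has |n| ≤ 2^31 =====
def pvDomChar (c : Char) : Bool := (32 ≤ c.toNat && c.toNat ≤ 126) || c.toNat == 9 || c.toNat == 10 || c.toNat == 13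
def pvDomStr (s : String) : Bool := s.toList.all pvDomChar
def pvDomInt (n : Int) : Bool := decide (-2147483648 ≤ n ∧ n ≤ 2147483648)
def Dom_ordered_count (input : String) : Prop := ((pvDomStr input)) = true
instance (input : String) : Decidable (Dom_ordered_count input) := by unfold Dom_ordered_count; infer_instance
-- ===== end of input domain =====

-- B replaces A's quadratic nested counting loop by a single pass over the string
-- with an insertion-ordered counter dict (objective: faster, O(n^2) -> O(n)).


-- ===== PORT A =====
-- helper 'tupling': builds the pair from char and count (the list-then-tuple dance collapses to a pair)
def tupling (char : String) (count : Int) : String × Int := (char, count)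

-- Python input[i] is a 1-character string; ported as String.ofList [c] on the toList side.
-- input[j]/input[i] indexing via PySem.List.pyGetD (indices produced by the ranges are always in range).
def ordered_count (input : String) : List (String × Int) :=
  let cs := input.toList
  let n : Int := (cs.length : Int)
  let st := (PySem.List.pyRange 0 n).foldl
    (fun (st : List (String × Int) × List String) i =>
      let ci := PySem.List.pyGetD cs i ' '
      let count_of_char : Int := (PySem.List.pyRange (i + 1) n).foldl
        (fun c j => if PySem.List.pyGetD cs j ' ' == ci then c + 1 else c) 1
      let result_lst :=
        if ¬ (String.ofList [ci] ∈ st.2) then st.1 ++ [tupling (String.ofList [ci]) count_of_char]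
        else st.1
      (result_lst, st.2 ++ [String.ofList [ci]])) ([], [])
  st.1

-- ===== PORT B =====
def ordered_count_alt (input : String) : List (String × Int) :=
  let counts := input.toList.foldl
    (fun (d : PySem.Dict Char Int) ch => d.insert ch (d.getD ch 0 + 1)) PySem.Dict.empty
  counts.items.map (fun p => (String.ofList [p.1], p.2))

-- ===== PRECONDITION & SPEC =====
def Spec_ordered_count (input : String) (out : List (String × Int)) : Prop := out = ordered_count_alt input
instance (input : String) (out : List (String × Int)) : Decidable (Spec_ordered_count input out) := by unfold Spec_ordered_count; infer_instance

-- ===== CLAIM (what is proved, stated in full; the proofs are below) =====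
def Claim_equal_ordered_count : Prop := ∀ (input : String), Dom_ordered_count input → Spec_ordered_count input (ordered_count input)

-- ===== LEMMAS AND PROOFS =====

-- the inner counting loop of A counts occurrences of x from index s to the end;
-- the outer-loop invariant of A after processing indices [0, k)
theorem pv_count_from (cs : List Char) (x : Char) (s : Nat) (init : Int) :
    (PySem.List.pyRange (s : Int) (cs.length : Int)).foldl
      (fun c j => if PySem.List.pyGetD cs j ' ' == x then c + 1 else c) init
    = init + (List.count x (cs.drop s) : Int) := by
  by_cases h : s < cs.length
  · have hr : PySem.List.pyRange (s : Int) (cs.length : Int)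
        = (s : Int) :: PySem.List.pyRange ((s : Int) + 1) (cs.length : Int) :=
      PySem.List.pyRange_one_cons (by exact_mod_cast h)
    have hg : PySem.List.pyGetD cs (s : Int) ' ' = cs[s] := by
      rw [PySem.List.pyGetD_eq_getElem cs ' ' (by positivity) (by exact_mod_cast h)]
      simp
    have hd : cs.drop s = cs[s] :: cs.drop (s + 1) := List.drop_eq_getElem_cons h
    have ih := pv_count_from cs x (s + 1)
    rw [hr]
    simp only [List.foldl_cons, hg]
    push_cast at ih ⊢
    rw [ih, hd]
    by_cases he : cs[s] = x
    · simp [he]; ring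
    · simp [he]
      rw [hd, List.count_cons_of_ne he]
  · have hr : PySem.List.pyRange (s : Int) (cs.length : Int) = [] := by
      simp [PySem.List.pyRange]; omega
    rw [hr, List.drop_eq_nil_of_le (by omega)]
    simp
termination_by cs.length - s

theorem pv_outer_inv (cs : List Char) (k : Nat) (hk : k ≤ cs.length) :
    (PySem.List.pyRange 0 (k : Int)).foldl
      (fun (st : List (String × Int) × List String) i =>
        let ci := PySem.List.pyGetD cs i ' '
        let count_of_char : Int := (PySem.List.pyRange (i + 1) (cs.length : Int)).foldl
          (fun c j => if PySem.List.pyGetD cs j ' ' == ci then c + 1 else c) 1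
        let result_lst :=
          if ¬ (String.ofList [ci] ∈ st.2) then st.1 ++ [tupling (String.ofList [ci]) count_of_char]
          else st.1
        (result_lst, st.2 ++ [String.ofList [ci]])) ([], [])
    = ((PySem.Set.ofList (cs.take k)).map (fun c => (String.ofList [c], (List.count c cs : Int))),
       (cs.take k).map (fun c => String.ofList [c])) := by
  induction k with
  | zero => simp [PySem.List.pyRange, PySem.Set.ofList]
  | succ k ih =>
    have hklt : k < cs.length := by omega
    have hr : PySem.List.pyRange 0 ((k : Nat) + 1 : Int) = PySem.List.pyRange 0 (k : Int) ++ [(k : Int)] :=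
      PySem.List.pyRange_one_succ_right (by positivity)
    have hcast : (((k + 1 : Nat)) : Int) = ((k : Nat) : Int) + 1 := by push_cast; ring
    rw [hcast, hr, List.foldl_append, ih (by omega)]
    have hg : PySem.List.pyGetD cs (k : Int) ' ' = cs[k] := by
      rw [PySem.List.pyGetD_eq_getElem cs ' ' (by positivity) (by exact_mod_cast hklt)]; simp
    have hcount := pv_count_from cs cs[k] (k + 1) 1
    have hcast2 : (((k + 1 : Nat)) : Int) = ((k : Nat) : Int) + 1 := hcast
    have htake : cs.take (k + 1) = cs.take k ++ [cs[k]] := by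
      rw [List.take_add_one]
      simp [List.getElem?_eq_getElem hklt]
    have hofl : PySem.Set.ofList (cs.take (k + 1))
        = PySem.Set.add (PySem.Set.ofList (cs.take k)) cs[k] := by
      rw [htake, PySem.Set.ofList_eq_foldl, List.foldl_append, ← PySem.Set.ofList_eq_foldl]
      rfl
    have hinj : ∀ a b : Char, String.ofList [a] = String.ofList [b] ↔ a = b := by
      intro a b
      constructor
      · intro h
        have := congrArg String.toList h
        simpa using this
      · intro h; rw [h]
    have hmem : (String.ofList [cs[k]] ∈ (cs.take k).map (fun c => String.ofList [c])) ↔ cs[k] ∈ cs.take k := by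
      simp only [List.mem_map]
      constructor
      · rintro ⟨a, ha, he⟩
        rwa [← (hinj a cs[k]).mp he]
      · intro h; exact ⟨cs[k], h, rfl⟩
    simp only [List.foldl_cons, List.foldl_nil, hg]
    rw [Prod.mk.injEq]
    refine ⟨?_, ?_⟩
    · rw [hofl]
      by_cases hin : cs[k] ∈ cs.take k
      · have hadd : PySem.Set.add (PySem.Set.ofList (cs.take k)) cs[k] = PySem.Set.ofList (cs.take k) := by
          simp [PySem.Set.add, PySem.Set.contains, (PySem.Set.mem_ofList (cs.take k) cs[k]).mpr hin]
        rw [if_neg (not_not_intro (hmem.mpr hin)), hadd]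
      · have hadd : PySem.Set.add (PySem.Set.ofList (cs.take k)) cs[k] = PySem.Set.ofList (cs.take k) ++ [cs[k]] := by
          simp only [PySem.Set.add, PySem.Set.contains]
          rw [if_neg]
          simp only [List.contains_iff_mem, PySem.Set.mem_ofList]
          exact hin
        have hcnt1 : List.count cs[k] (cs.take k) + List.count cs[k] (cs.drop k) = List.count cs[k] cs := by
          rw [← List.count_append, List.take_append_drop]
        have hcnt : (List.count cs[k] cs : Int) = 1 + (List.count cs[k] (cs.drop (k + 1)) : Int) := by
          rw [← hcnt1, List.count_eq_zero.mpr hin, List.drop_eq_getElem_cons hklt, List.count_cons_self]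
          push_cast; ring
        rw [hcast2] at hcount
        rw [if_pos (fun hm => hin (hmem.mp hm)), hadd, List.map_append, hcount, ← hcnt]
        rfl
    · rw [htake, List.map_append]
      rfl

-- ===== VERDICT (by name: the statement is the Claim_ definition above) =====
theorem ordered_count_spec : Claim_equal_ordered_count := by
  intro input _
  unfold Spec_ordered_count ordered_count ordered_count_alt
  rw [PySem.Dict.foldl_insert_getD_add_one_eq_counter]
  simp only [PySem.Dict.items_counter, pv_outer_inv input.toList input.toList.length le_rfl,
    List.take_length, List.map_map]
  rfl
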